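-- pv_equiv track=rewrite | github.com/matthematics/schubmult | src/schubmult/rings/polynomial_algebra/forest_poly_basis.py | word_to_canonical_composition_accurate
-- ===== SOURCE A (Python) =====
-- def word_to_canonical_composition_accurate(word):
--     """
--     Converts a word to its canonical weak composition by first
--     reducing it to its unique non-increasing 'slide' equivalent.
--     """
--     if not word:
--         return []
--
--     # Slide logic: We can decrement an entry i_j to i_j - 1
--     # if it doesn't create a new descent or violate a_j <= i_j.
--     # For 423 -> 422, the '3' can slide down to '2' because
--     # it is preceded by a '2' and 2 <= 3.
--     canonical_word = list(word)
--     done_any = True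
--     while done_any:
--         done_any = False
--         for i in range(len(canonical_word) - 1, 0, -1):
--             # If a number is greater than the one to its left,
--             # it can often be 'slid' down.
--             if canonical_word[i - 1] < canonical_word[i]:
--                 canonical_word[i] = canonical_word[i - 1]
--                 done_any = True
--     # check same descents as word
--     for i in range(len(word) - 1):
--         if (word[i] > word[i + 1]) != (canonical_word[i] > canonical_word[i + 1]):
--             return None
--     # Sort non-increasingly to get the standard representative W_c
--     # canonical_word.sort(reverse=True)
--     # Now convert the canonical word to a composition
--     max_val = max(canonical_word)
--     composition = [0] * max_val
--     for val in canonical_word: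
--         composition[val - 1] += 1
--     return tuple(composition)
-- ===== SOURCE B (Python) =====
-- def word_to_canonical_composition_accurate(word):
--     """Same result via a single fused pass: the slide fixpoint of a word is its
--     running prefix minimum, so compute it in O(n) while checking descents."""
--     if not word:
--         return []
--     canonical = []
--     m = word[0]
--     prev_w = None
--     prev_c = 0
--     for w in word:
--         if w < m:
--             m = w
--         if prev_w is not None and (prev_w > w) != (prev_c > m):
--             return None
--         canonical.append(m)
--         prev_w = w
--         prev_c = m
--     composition = [0] * word[0]
--     for val in canonical:
--         composition[val - 1] += 1
--     return tuple(composition)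
-- ===== Notes on version B (the rewrite author's own statement) =====
-- stated objective: faster
-- what changed: A reaches the slide fixpoint by repeated right-to-left passes over the whole word (a while-loop until no change); B computes the same fixpoint - the running prefix minimum - in one fused left-to-right pass that also checks the descent condition on the fly.
-- outside the precondition, e.g. on word_to_canonical_composition_accurate([0]): A raises IndexError, B raises IndexError
import Mathlib
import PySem

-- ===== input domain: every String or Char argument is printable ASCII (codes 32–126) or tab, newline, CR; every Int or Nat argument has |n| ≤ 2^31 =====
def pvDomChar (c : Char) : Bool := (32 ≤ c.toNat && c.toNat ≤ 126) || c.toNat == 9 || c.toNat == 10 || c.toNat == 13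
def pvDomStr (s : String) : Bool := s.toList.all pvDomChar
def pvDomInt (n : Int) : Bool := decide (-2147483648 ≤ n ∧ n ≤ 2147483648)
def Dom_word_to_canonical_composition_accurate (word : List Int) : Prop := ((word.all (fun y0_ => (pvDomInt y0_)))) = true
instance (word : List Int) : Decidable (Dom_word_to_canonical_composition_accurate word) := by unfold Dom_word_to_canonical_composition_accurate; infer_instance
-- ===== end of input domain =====

-- B replaces A's repeated slide passes (a while-loop of right-to-left sweeps, O(n^2)) by one
-- fused left-to-right pass computing the running prefix minimum and the descent check together.

-- ===== PORT A =====
-- inner loop 'for i in range(len(c)-1, 0, -1): if c[i-1] < c[i]: c[i] = c[i-1]; done_any = True':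
-- recursion on the index counting down; every index visited is in range, so getD/set are exact here.
def pvForA : List Int → Bool → Nat → List Int × Bool
  | c, d, 0 => (c, d)
  | c, d, i+1 =>
      if c.getD i 0 < c.getD (i+1) 0 then pvForA (c.set (i+1) (c.getD i 0)) true i
      else pvForA c d i

-- 'while done_any:' — one pass per fuel unit; fuel = len(word)+1 passes provably reach the
-- fixpoint (each pass settles one more prefix position; see the slide lemmas below).
def pvSlideA : Nat → List Int → List Int
  | 0, c => c
  | fuel+1, c =>
      let r := pvForA c false (c.length - 1)
      if r.2 then pvSlideA fuel r.1 else r.1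

-- 'for i in range(len(word) - 1): if (word[i] > word[i+1]) != (canonical[i] > canonical[i+1]): return None'
def pvDescOK (word c : List Int) : Bool :=
  (List.range (word.length - 1)).all (fun i =>
    decide (word.getD i 0 > word.getD (i+1) 0) == decide (c.getD i 0 > c.getD (i+1) 0))

-- 'composition = [0] * size; for val in vals: composition[val - 1] += 1' — both Pythons contain
-- this identical loop; [0]*size is empty for size ≤ 0, and indexing follows Python (pyGet?/pySet?).
def pvComp (size : Int) (vals : List Int) : Option (List Int) :=
  vals.foldl
    (fun acc v => acc.bind (fun comp =>
      (PySem.List.pyGet? comp (v - 1)).bind (fun cur =>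
        PySem.List.pySet? comp (v - 1) (cur + 1))))
    (some (List.replicate size.toNat 0))

def word_to_canonical_composition_accurate (word : List Int) : Option (List Int) :=
  if word = [] then some [] else
  let canonical := pvSlideA (word.length + 1) word
  if pvDescOK word canonical then
    match PySem.List.max? canonical (fun x => x) with
    | none => none   -- unreachable: canonical is nonempty
    | some m => pvComp m canonical
  else none

-- ===== PORT B =====
-- Source B's single fused loop: state (m = running min, prev_w, prev_c, canonical); the first
-- iteration (prev_w is None) is the call site's initial state, as in Source B.
def pvFuseGo : List Int → Int → Int → Int → List Int → Option (List Int)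
  | [], _, _, _, acc => some acc
  | w :: rest, m, pw, pc, acc =>
      let m' := if w < m then w else m
      if (decide (pw > w)) != (decide (pc > m')) then none
      else pvFuseGo rest m' w m' (acc ++ [m'])

def word_to_canonical_composition_accurate_alt (word : List Int) : Option (List Int) :=
  match word with
  | [] => some []
  | w0 :: rest =>
      match pvFuseGo rest w0 w0 w0 [w0] with
      | none => none
      | some canonical => pvComp w0 canonical

-- ===== PRECONDITION & SPEC =====
-- Pre_ excludes exactly the inputs on which Python A raises IndexError in the composition loop
-- (both Pythons raise there): a nonempty word with no flattened descent (no j ≤ i with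
-- word[j] ≤ word[i+1] < word[i], which would make both return None first) whose first element is
-- < 1 or that contains an element ≤ -word[0] (e.g. [0]: both raise IndexError). The ports map
-- that raise to `none`, and the port-level equality below in fact holds on every input, so the
-- proof of the claim does not need the Pre_ hypothesis; Pre_'s only role is to keep the claim
-- about inputs where Python A returns.
def Pre_word_to_canonical_composition_accurate (word : List Int) : Prop :=
  word = [] ∨
  (1 ≤ word.getD 0 0 ∧ ∀ x ∈ word, 1 - word.getD 0 0 ≤ x) ∨
  (∃ i < word.length - 1, ∃ j ≤ i,
    word.getD j 0 ≤ word.getD (i+1) 0 ∧ word.getD (i+1) 0 < word.getD i 0)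
instance (word : List Int) : Decidable (Pre_word_to_canonical_composition_accurate word) := by
  unfold Pre_word_to_canonical_composition_accurate; infer_instance

def pvWitness_word_to_canonical_composition_accurate : List Int := [2, 1, 2]

def Spec_word_to_canonical_composition_accurate (word : List Int) (out : Option (List Int)) : Prop := out = word_to_canonical_composition_accurate_alt word
instance (word : List Int) (out : Option (List Int)) : Decidable (Spec_word_to_canonical_composition_accurate word out) := by unfold Spec_word_to_canonical_composition_accurate; infer_instance

-- ===== CLAIM (what is proved, stated in full; the proofs are below) =====
def Claim_equal_word_to_canonical_composition_accurate : Prop := ∀ (word : List Int), Dom_word_to_canonical_composition_accurate word → Pre_word_to_canonical_composition_accurate word → Spec_word_to_canonical_composition_accurate word (word_to_canonical_composition_accurate word)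

-- ===== LEMMAS AND PROOFS =====

-- the prefix-minimum list both programs converge to: pvPM m l = [min(m,l0), min(m,l0,l1), …]
def pvPM (m : Int) : List Int → List Int
  | [] => []
  | w :: ws => min m w :: pvPM (min m w) ws

-- structural form of B's fused descent check
def pvDsc : Int → Int → Int → List Int → Bool
  | _, _, _, [] => true
  | pw, pc, m, w :: ws => (decide (pw > w) == decide (pc > min m w)) && pvDsc w (min m w) (min m w) ws

-- structural form of A's index-based descent check
def pvAdj : List Int → List Int → Bool
  | a :: b :: u, x :: y :: v => (decide (a > b) == decide (x > y)) && pvAdj (b :: u) (y :: v)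
  | _, _ => true

theorem pvPM_length (m : Int) (l : List Int) : (pvPM m l).length = l.length := by
  induction l generalizing m with
  | nil => rfl
  | cons w ws ih => simp [pvPM, ih]

theorem getD_set_lt {c : List Int} {i j : Nat} {a : Int} (h : i < c.length) :
    (c.set i a).getD j 0 = if j = i then a else c.getD j 0 := by
  simp only [List.getD_eq_getElem?_getD, List.getElem?_set]
  split
  · rename_i hji
    subst hji
    simp
  · rename_i hji
    rw [if_neg (fun hh => hji hh.symm)]

theorem pvForA_spec (k : Nat) (c : List Int) (d : Bool) (hk : k < c.length) :
    (pvForA c d k).1.length = c.length ∧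
    (∀ j : Nat, (pvForA c d k).1.getD j 0 =
      if 1 ≤ j ∧ j ≤ k then min (c.getD (j-1) 0) (c.getD j 0) else c.getD j 0) ∧
    ((pvForA c d k).2 = true ↔ d = true ∨ ∃ j, 1 ≤ j ∧ j ≤ k ∧ c.getD (j-1) 0 < c.getD j 0) := by
  induction k generalizing c d with
  | zero =>
    refine ⟨rfl, ?_, ?_⟩
    · intro j; rw [if_neg (by omega)]; rfl
    · show d = true ↔ _
      constructor
      · exact fun h => Or.inl h
      · rintro (h | ⟨j, h1, h2, _⟩)
        · exact h
        · omega
  | succ k ih =>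
    by_cases hlt : c.getD k 0 < c.getD (k+1) 0
    · have hset : (c.set (k+1) (c.getD k 0)).length = c.length := by simp
      have hk' : k < (c.set (k+1) (c.getD k 0)).length := by omega
      have hgd : ∀ j : Nat, (c.set (k+1) (c.getD k 0)).getD j 0 =
          if j = k+1 then c.getD k 0 else c.getD j 0 := fun j => getD_set_lt (by omega)
      obtain ⟨ih1, ih2, ih3⟩ := ih (c.set (k+1) (c.getD k 0)) true hk'
      have hstep : pvForA c d (k+1) = pvForA (c.set (k+1) (c.getD k 0)) true k := by
        simp only [pvForA]; rw [if_pos hlt]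
      refine ⟨by rw [hstep]; omega, ?_, ?_⟩
      · intro j
        rw [hstep, ih2 j]
        by_cases hj1 : 1 ≤ j ∧ j ≤ k
        · rw [if_pos hj1, if_pos (by omega)]
          rw [hgd (j-1), hgd j, if_neg (by omega), if_neg (by omega)]
        · rw [if_neg hj1]
          by_cases hj2 : j = k + 1
          · subst hj2
            rw [hgd (k+1), if_pos rfl, if_pos (by omega)]
            have : (k+1) - 1 = k := by omega
            rw [this]
            omega
          · rw [hgd j, if_neg hj2, if_neg (by omega)]
      · rw [hstep, ih3]
        constructor
        · intro _; right; exact ⟨k+1, by omega, by omega, by simpa using hlt⟩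
        · intro _; left; rfl
    · have hstep : pvForA c d (k+1) = pvForA c d k := by
        simp only [pvForA]; rw [if_neg hlt]
      obtain ⟨ih1, ih2, ih3⟩ := ih c d (by omega)
      refine ⟨by rw [hstep]; omega, ?_, ?_⟩
      · intro j
        rw [hstep, ih2 j]
        by_cases hj1 : 1 ≤ j ∧ j ≤ k
        · rw [if_pos hj1, if_pos (by omega)]
        · rw [if_neg hj1]
          by_cases hj2 : j = k + 1
          · subst hj2
            rw [if_pos (by omega)]
            have : (k+1) - 1 = k := by omega
            rw [this]
            omega
          · rw [if_neg (by omega)]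
      · rw [hstep, ih3]
        constructor
        · rintro (h | ⟨j, h1, h2, h3⟩)
          · exact Or.inl h
          · exact Or.inr ⟨j, h1, by omega, h3⟩
        · rintro (h | ⟨j, h1, h2, h3⟩)
          · exact Or.inl h
          · by_cases hj : j = k + 1
            · subst hj
              have hkk : (k+1) - 1 = k := by omega
              rw [hkk] at h3
              exact absurd h3 hlt
            · exact Or.inr ⟨j, h1, by omega, h3⟩

theorem pvPM_rec (l : List Int) (m : Int) (j : Nat) (hj : j < l.length) :
    (pvPM m l).getD j 0 = min ((m :: pvPM m l).getD j 0) (l.getD j 0) := by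
  induction l generalizing m j with
  | nil => simp at hj
  | cons w ws ih =>
    cases j with
    | zero => simp [pvPM]
    | succ j =>
      simp only [pvPM, List.getD_cons_succ]
      simpa using ih (min m w) j (by simpa using hj)

theorem pvPM_le (m : Int) (l : List Int) : ∀ x ∈ pvPM m l, x ≤ m := by
  induction l generalizing m with
  | nil => simp [pvPM]
  | cons w ws ih =>
    intro x hx
    simp only [pvPM, List.mem_cons] at hx
    rcases hx with h | h
    · simp [h]
    · exact le_trans (ih (min m w) x h) (min_le_left _ _)

theorem pvFuseGo_spec (l : List Int) (m pw pc : Int) (acc : List Int) :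
    pvFuseGo l m pw pc acc = if pvDsc pw pc m l then some (acc ++ pvPM m l) else none := by
  induction l generalizing m pw pc acc with
  | nil => simp [pvFuseGo, pvDsc, pvPM]
  | cons w ws ih =>
    have hmin : (if w < m then w else m) = min m w := by
      rcases lt_or_ge w m with h | h
      · simp [h, min_eq_right h.le]
      · simp [not_lt.mpr h, min_eq_left h]
    simp only [pvFuseGo, pvDsc, pvPM, hmin]
    cases h : decide (pw > w) == decide (pc > min m w) with
    | false => simp only [bne, h, Bool.not_false, Bool.false_and]; simp
    | true =>
      simp only [bne, h, Bool.not_true, Bool.true_and, ih]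
      rw [if_neg (by simp)]
      split <;> simp

theorem pvAdj_eq_pvDsc (l : List Int) (pw pc m : Int) :
    pvAdj (pw :: l) (pc :: pvPM m l) = pvDsc pw pc m l := by
  induction l generalizing pw pc m with
  | nil => rfl
  | cons w ws ih => simp only [pvPM, pvAdj, pvDsc, ih]

theorem pvDescOK_eq_pvAdj (u v : List Int) (h : u.length = v.length) :
    pvDescOK u v = pvAdj u v := by
  induction u generalizing v with
  | nil => simp [pvDescOK, pvAdj]
  | cons a u' ih =>
    cases u' with
    | nil =>
      cases v with
      | nil => simp at h
      | cons x v' => simp [pvDescOK, pvAdj]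
    | cons b u'' =>
      cases v with
      | nil => simp at h
      | cons x v' =>
        cases v' with
        | nil => simp at h
        | cons y v'' =>
          have hlen : (a :: b :: u'').length - 1 = u''.length + 1 := by simp
          have hlen2 : (b :: u'').length - 1 = u''.length := by simp
          show (List.range ((a :: b :: u'').length - 1)).all _ = _
          rw [hlen, List.range_succ_eq_map]
          simp only [List.all_cons, List.all_map]
          have htail : (List.range u''.length).all
              (fun i => decide ((a :: b :: u'').getD (i+1) 0 > (a :: b :: u'').getD (i+1+1) 0) ==
                        decide ((x :: y :: v'').getD (i+1) 0 > (x :: y :: v'').getD (i+1+1) 0)) =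
              pvDescOK (b :: u'') (y :: v'') := by
            unfold pvDescOK
            rw [hlen2]
            simp
          have := ih (y :: v'') (by simpa using h)
          simp only [Function.comp_def] at *
          rw [htail] at *
          simp [pvAdj, this]

theorem foldl_max_of_le (l : List Int) (a : Int) (h : ∀ x ∈ l, x ≤ a) : l.foldl max a = a := by
  induction l generalizing a with
  | nil => rfl
  | cons x xs ih =>
    simp only [List.foldl_cons]
    rw [max_eq_left (h x (by simp))]
    exact ih a (fun y hy => h y (by simp [hy]))

theorem pvMax_pvPM (w0 : Int) (rest : List Int) :
    PySem.List.max? (w0 :: pvPM w0 rest) (fun x => x) = some w0 := by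
  rw [PySem.List.max?_id_cons]
  rw [foldl_max_of_le _ _ (pvPM_le w0 rest)]

theorem getD_ext (l1 l2 : List Int) (hl : l1.length = l2.length)
    (h : ∀ j, j < l1.length → l1.getD j 0 = l2.getD j 0) : l1 = l2 := by
  apply List.ext_getElem hl
  intro i h1 h2
  have := h i h1
  rwa [List.getD_eq_getElem l1 0 h1, List.getD_eq_getElem l2 0 h2] at this

theorem pvSlideMain (w0 : Int) (rest : List Int) :
    ∀ (fuel t : Nat) (c : List Int),
    c.length = (w0 :: rest).length →
    1 ≤ t →
    (∀ j, j < min t (w0 :: rest).length → c.getD j 0 = (w0 :: pvPM w0 rest).getD j 0) →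
    (∀ j, j < (w0 :: rest).length →
      (w0 :: pvPM w0 rest).getD j 0 ≤ c.getD j 0 ∧ c.getD j 0 ≤ (w0 :: rest).getD j 0) →
    (w0 :: rest).length + 1 ≤ fuel + t →
    pvSlideA fuel c = w0 :: pvPM w0 rest := by
  intro fuel
  set word : List Int := w0 :: rest with hword
  set C : List Int := w0 :: pvPM w0 rest with hC
  set n : Nat := word.length with hn
  have hn1 : 1 ≤ n := by simp [hn, hword]
  have hCl : C.length = n := by simp [hC, hn, hword, pvPM_length]
  have hC0 : C.getD 0 0 = word.getD 0 0 := by simp [hC, hword]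
  have hCrec : ∀ j, j + 1 < n → C.getD (j+1) 0 = min (C.getD j 0) (word.getD (j+1) 0) := by
    intro j hj
    have hj' : j < rest.length := by simp [hn, hword] at hj; omega
    have := pvPM_rec rest w0 j hj'
    simpa [hC, hword] using this
  have hCni : ∀ j, j + 1 < n → C.getD (j+1) 0 ≤ C.getD j 0 := by
    intro j hj; rw [hCrec j hj]; exact min_le_left _ _
  have hCle : ∀ j, j < n → C.getD j 0 ≤ word.getD j 0 := by
    intro j
    induction j with
    | zero => intro _; rw [hC0]
    | succ j ihj => intro hj; rw [hCrec j hj]; exact min_le_right _ _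
  induction fuel with
  | zero =>
    intro t c hlen ht hset hinv hfuel
    show c = C
    apply getD_ext c C (by omega)
    intro j hj
    apply hset
    omega
  | succ fuel ihf =>
    intro t c hlen ht hset hinv hfuel
    have hk : n - 1 < c.length := by omega
    obtain ⟨s1, s2, s3⟩ := pvForA_spec (c.length - 1) c false (by omega)
    have hkk : c.length - 1 = n - 1 := by omega
    show (if (pvForA c false (c.length - 1)).2 = true
          then pvSlideA fuel (pvForA c false (c.length - 1)).1
          else (pvForA c false (c.length - 1)).1) = C
    by_cases hb : (pvForA c false (c.length - 1)).2 = true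
    · rw [if_pos hb]
      -- there is an ascent, so not everything is settled: t ≤ n
      obtain ⟨j0, hj01, hj0k, hj0lt⟩ := (s3.mp hb).resolve_left (by simp)
      have htn : t ≤ n := by
        by_contra hgt
        have e1 : c.getD (j0-1) 0 = C.getD (j0-1) 0 := hset _ (by omega)
        have e2 : c.getD j0 0 = C.getD j0 0 := hset _ (by omega)
        have := hCni (j0-1) (by omega)
        have hj0 : j0 - 1 + 1 = j0 := by omega
        rw [hj0] at this
        omega
      apply ihf (t+1) _ (by omega) (by omega) ?hset ?hinv (by omega)
      case hset =>
        intro j hj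
        rw [s2 j]
        rcases Nat.eq_zero_or_pos j with hj0' | hjpos
        · subst hj0'
          rw [if_neg (by omega)]
          exact hset 0 (by omega)
        · rw [if_pos (by omega)]
          have hjn : j < n := by omega
          rcases Nat.lt_or_ge j t with hjt | hjt
          · have e1 : c.getD (j-1) 0 = C.getD (j-1) 0 := hset _ (by omega)
            have e2 : c.getD j 0 = C.getD j 0 := hset _ (by omega)
            have h3 := hCni (j-1) (by omega)
            have hj0 : j - 1 + 1 = j := by omega
            rw [hj0] at h3
            omega
          · -- j = t, the newly settled position
            have hjt' : j = t := by omega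
            subst hjt'
            have e1 : c.getD (j-1) 0 = C.getD (j-1) 0 := hset _ (by omega)
            have h2 := hCrec (j-1) (by omega)
            have hj0 : j - 1 + 1 = j := by omega
            rw [hj0] at h2
            have h4 := hinv j (by omega)
            have h5 := hCni (j-1) (by omega)
            rw [hj0] at h5
            omega
      case hinv =>
        intro j hj
        rw [s2 j]
        rcases Nat.eq_zero_or_pos j with hj0' | hjpos
        · subst hj0'
          rw [if_neg (by omega)]
          exact hinv 0 hj
        · rw [if_pos (by omega)]
          have h1 := hinv (j-1) (by omega)
          have h2 := hinv j hj
          have h3 := hCni (j-1) (by omega)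
          have hj0 : j - 1 + 1 = j := by omega
          rw [hj0] at h3
          omega
    · rw [if_neg hb]
      -- no ascent: c is non-increasing, hence c = C, and the pass is the identity
      have hnoasc : ∀ j, 1 ≤ j → j ≤ n - 1 → ¬ c.getD (j-1) 0 < c.getD j 0 := by
        intro j h1 h2 hlt
        exact hb (s3.mpr (Or.inr ⟨j, h1, by omega, hlt⟩))
      have hcC : ∀ j, j < n → c.getD j 0 = C.getD j 0 := by
        intro j
        induction j with
        | zero => intro _; exact hset 0 (by omega)
        | succ j ihj =>
          intro hj
          have e1 := ihj (by omega)
          have h2 := hinv (j+1) hj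
          have h3 := hCrec j hj
          have h4 := hnoasc (j+1) (by omega) (by omega)
          simp only [Nat.add_sub_cancel] at h4
          omega
      apply getD_ext _ _ (by omega)
      intro j hj
      rw [s2 j]
      have hjn : j < n := by omega
      rcases Nat.eq_zero_or_pos j with hj0' | hjpos
      · subst hj0'
        rw [if_neg (by omega)]
        exact hcC 0 (by omega)
      · by_cases hjk : j ≤ c.length - 1
        · rw [if_pos (by omega)]
          have h4 := hnoasc j (by omega) (by omega)
          have e2 := hcC j hjn
          omega
        · rw [if_neg (by omega)]
          exact hcC j hjn

theorem pvSlideA_eq_pvPM (w0 : Int) (rest : List Int) :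
    pvSlideA ((w0 :: rest).length + 1) (w0 :: rest) = w0 :: pvPM w0 rest := by
  have hCle : ∀ j, j < (w0 :: rest).length →
      (w0 :: pvPM w0 rest).getD j 0 ≤ (w0 :: rest).getD j 0 := by
    intro j
    induction j with
    | zero => intro _; simp
    | succ j ihj =>
      intro hj
      have hj' : j < rest.length := by simpa using hj
      have := pvPM_rec rest w0 j hj'
      simp only [List.getD_cons_succ]
      rw [this]
      exact min_le_right _ _
  apply pvSlideMain w0 rest ((w0 :: rest).length + 1) 1 (w0 :: rest) rfl le_rfl
  · intro j hj
    have : j = 0 := by omega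
    subst this
    rfl
  · intro j hj
    exact ⟨hCle j hj, le_rfl⟩
  · omega

theorem ports_agree (word : List Int) :
    word_to_canonical_composition_accurate word = word_to_canonical_composition_accurate_alt word := by
  cases word with
  | nil => rfl
  | cons w0 rest =>
    show (if (w0 :: rest) = [] then some [] else _) = _
    rw [if_neg (List.cons_ne_nil w0 rest)]
    show (if pvDescOK (w0 :: rest) (pvSlideA ((w0 :: rest).length + 1) (w0 :: rest)) then _ else none) = _
    rw [pvSlideA_eq_pvPM w0 rest]
    rw [pvDescOK_eq_pvAdj _ _ (by simp [pvPM_length])]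
    rw [pvAdj_eq_pvDsc]
    show _ = (match pvFuseGo rest w0 w0 w0 [w0] with
              | none => none
              | some canonical => pvComp w0 canonical)
    rw [pvFuseGo_spec]
    by_cases h : pvDsc w0 w0 w0 rest
    · rw [if_pos h, if_pos h, pvMax_pvPM]
      simp
    · rw [if_neg h, if_neg h]

-- ===== VERDICT (by name: the statement is the Claim_ definition above) =====
theorem word_to_canonical_composition_accurate_spec : Claim_equal_word_to_canonical_composition_accurate := by
  intro word _ _
  unfold Spec_word_to_canonical_composition_accurate
  exact ports_agree word
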